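-- pv_equiv track=rewrite | github.com/LIKHUB/guesser_game | test.py | try_symbols
-- ===== SOURCE A (Python) =====
-- def try_symbols(list_of_symbols, word):#Проверка символов из введенной попытки на присутствие в слове
--
--     appropriate_symbols = []
--
--     for i in range(0, len(word)):
--         for j in range(0, len(list_of_symbols)):#Проверка каждого символа на присутствие в слове
--             if word.lower()[i] == list_of_symbols[j].lower():
--                 appropriate_symbols.append(list_of_symbols[j])
--
--     for i in range(0, len(appropriate_symbols)):#Проверка если в слове были повторяющиеся буквы и их замена на пустые строки
--         for j in range(0, i):
--             if appropriate_symbols[i] == appropriate_symbols[j]: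
--                 appropriate_symbols[j] = ''
--
--     appropriate_symbols = ''.join(appropriate_symbols).strip()
--     appropriate_symbols = [appropriate_symbols[i] for i in range(len(appropriate_symbols))]
--
--     return appropriate_symbols
-- ===== SOURCE B (Python) =====
-- # B: dict index lowered-char -> matching symbols, single pass over the word,
-- # dedup keeping the last occurrence via a reversed pass, then trim whitespace chars.
-- def try_symbols(list_of_symbols, word):
--     index = {}
--     for s in list_of_symbols:
--         if len(s) == 1:
--             index.setdefault(s.lower(), []).append(s)
--     collected = []
--     for ch in word.lower():
--         collected.extend(index.get(ch, []))
--     seen = set()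
--     kept = []
--     for s in reversed(collected):
--         if s not in seen:
--             seen.add(s)
--             kept.append(s)
--     kept.reverse()
--     while kept and kept[0].isspace():
--         kept.pop(0)
--     while kept and kept[-1].isspace():
--         kept.pop()
--     return kept
-- ===== Notes on version B (the rewrite author's own statement) =====
-- stated objective: faster
-- what changed: A scans all symbols for every character of the word and then blanks duplicates with a quadratic nested index loop; B builds a dict from lowercased single-char symbol to its matching symbols once, does one pass over the word, removes duplicates keeping the last occurrence in a single reversed pass with a seen-set, and trims whitespace entries at both ends.
import Mathlib
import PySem

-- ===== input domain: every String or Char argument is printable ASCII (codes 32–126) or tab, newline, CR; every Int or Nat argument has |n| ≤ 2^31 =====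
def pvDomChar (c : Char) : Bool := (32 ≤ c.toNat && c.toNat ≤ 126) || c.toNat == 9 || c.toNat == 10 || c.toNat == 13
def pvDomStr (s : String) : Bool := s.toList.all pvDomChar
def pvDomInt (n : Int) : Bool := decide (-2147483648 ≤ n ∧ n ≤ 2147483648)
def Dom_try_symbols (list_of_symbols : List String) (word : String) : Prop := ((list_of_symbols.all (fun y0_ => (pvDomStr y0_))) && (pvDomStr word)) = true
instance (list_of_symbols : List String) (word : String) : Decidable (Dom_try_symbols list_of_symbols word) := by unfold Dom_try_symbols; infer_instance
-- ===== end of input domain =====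

-- B replaces A's nested word×symbols scan and quadratic in-place duplicate blanking by a
-- lowercased-char → symbols index, one pass over the word, a reversed-pass keep-last dedup
-- with a seen-set, and whitespace trimming at both ends (objective: faster).

-- ===== PORT A =====
-- phase 1: for i in range(0, len(word)): for j in range(0, len(list_of_symbols)):
--   if word.lower()[i] == list_of_symbols[j].lower(): append(list_of_symbols[j])
def pvA_collect (list_of_symbols : List String) (word : String) : List String :=
  (PySem.List.pyRange 0 (PySem.Str.len word)).foldl (fun acc i =>
    (PySem.List.pyRange 0 (PySem.List.len list_of_symbols)).foldl (fun acc j =>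
      if [PySem.List.pyGetD (PySem.Str.lower word).toList i ' ']
           == (PySem.Str.lower (PySem.List.pyGetD list_of_symbols j "")).toList
      then acc ++ [PySem.List.pyGetD list_of_symbols j ""] else acc) acc) []

-- phase 2: for i in range(0, len(app)): for j in range(0, i):
--   if app[i] == app[j]: app[j] = ''
def pvA_blank (app : List String) : List String :=
  (PySem.List.pyRange 0 (PySem.List.len app)).foldl (fun l i =>
    (PySem.List.pyRange 0 i).foldl (fun l j =>
      if PySem.List.pyGetD l i "" == PySem.List.pyGetD l j "" then l.set j.toNat "" else l) l)
    app

-- ''.join(...).strip(), then [s[i] for i in range(len(s))]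
def try_symbols (list_of_symbols : List String) (word : String) : List String :=
  let stripped := PySem.Str.strip (PySem.Str.join "" (pvA_blank (pvA_collect list_of_symbols word)))
  (PySem.List.pyRange 0 (PySem.Str.len stripped)).map
    (fun i => String.ofList [PySem.List.pyGetD stripped.toList i ' '])

-- ===== PORT B =====
-- index: lowered single-char symbol -> list of symbols (setdefault(s.lower(), []).append(s))
def pvB_index (list_of_symbols : List String) : PySem.Dict String (List String) :=
  list_of_symbols.foldl (fun d s =>
    if PySem.Str.len s == 1 then
      d.insert (PySem.Str.lower s) (d.getD (PySem.Str.lower s) [] ++ [s])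
    else d) ⟨[]⟩

-- for ch in word.lower(): collected.extend(index.get(ch, []))
def pvB_collect (list_of_symbols : List String) (word : String) : List String :=
  (PySem.Str.lower word).toList.foldl
    (fun acc c => acc ++ (pvB_index list_of_symbols).getD (String.ofList [c]) []) []

-- reversed pass with a seen set, then reverse: keep the last occurrence of each symbol
def pvB_dedup (collected : List String) : List String :=
  (collected.reverse.foldl
    (fun (p : PySem.Set String × List String) s =>
      if p.1.contains s then p else (p.1.add s, p.2 ++ [s]))
    (PySem.Set.ofList [], [])).2.reverse

-- while kept and kept[0].isspace(): pop(0); while kept and kept[-1].isspace(): pop()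
def try_symbols_alt (list_of_symbols : List String) (word : String) : List String :=
  let kept := (pvB_dedup (pvB_collect list_of_symbols word)).dropWhile
    (fun s => PySem.Str.strIsspace s)
  (kept.reverse.dropWhile (fun s => PySem.Str.strIsspace s)).reverse

-- ===== PRECONDITION & SPEC =====
def Spec_try_symbols (list_of_symbols : List String) (word : String) (out : List String) : Prop := out = try_symbols_alt list_of_symbols word
instance (list_of_symbols : List String) (word : String) (out : List String) : Decidable (Spec_try_symbols list_of_symbols word out) := by unfold Spec_try_symbols; infer_instance

-- ===== CLAIM (what is proved, stated in full; the proofs are below) =====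
def Claim_equal_try_symbols : Prop := ∀ (list_of_symbols : List String) (word : String), Dom_try_symbols list_of_symbols word → Spec_try_symbols list_of_symbols word (try_symbols list_of_symbols word)

-- ===== LEMMAS AND PROOFS =====

-- the char-level matching predicate shared by both phase-1 characterisations
def pvMatch (c : Char) (s : String) : Bool := [c] == (PySem.Str.lower s).toList

-- canonical phase-1 result: for each char of the lowered word, the matching symbols in order
def pvColl (syms : List String) (w : List Char) : List String :=
  w.flatMap (fun c => syms.filter (pvMatch c))

-- A's duplicate blanking, structurally: an element that re-occurs later becomes ''
def pvBlank : List String → List String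
  | [] => []
  | x :: xs => (if x ∈ xs then "" else x) :: pvBlank xs

-- keep only the last occurrence of each element
def pvKeepLast : List String → List String
  | [] => []
  | x :: xs => if x ∈ xs then pvKeepLast xs else x :: pvKeepLast xs

-- left-to-right dedup keeping first occurrences, with an explicit seen accumulator
def pvDedup (seen : List String) : List String → List String
  | [] => []
  | x :: xs => if x ∈ seen then pvDedup seen xs else x :: pvDedup (seen ++ [x]) xs

def pvCharsOf (L : List String) : List Char := (L.map String.toList).flatten

def pvOne (L : List String) : Prop := ∀ s ∈ L, s.toList.length = 1

-- Nat-indexed views of A's two mutation loops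
def pvInner (n : Nat) (i : Nat) (l : List String) : List String :=
  (List.range i).foldl (fun l j => if l.getD n "" == l.getD j "" then l.set j "" else l) l

def pvOuter (L : List String) (i : Nat) : List String :=
  (List.range i).foldl (fun l n => pvInner n n l) L

def pvCond (L : List String) (k i : Nat) : Bool :=
  (List.range i).any (fun m => decide (k < m) && (L.getD m "" == L.getD k ""))

-- ---- A phase 1 ----
theorem pvCharsOf_cons (s : String) (L : List String) :
    pvCharsOf (s :: L) = s.toList ++ pvCharsOf L := by
  simp [pvCharsOf]

theorem pvA_collect_eq (syms : List String) (word : String) :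
    pvA_collect syms word = pvColl syms (PySem.Chars.lower word.toList) := by
  unfold pvA_collect
  simp only [PySem.Str.toList_lower]
  have hlen : PySem.Str.len word = PySem.List.len (PySem.Chars.lower word.toList) := by
    simp [PySem.Str.len_eq, PySem.List.len, PySem.Chars.lower]
  rw [hlen]
  have hinner : ∀ (acc : List String) (c : Char),
      (PySem.List.pyRange 0 (PySem.List.len syms)).foldl (fun acc j =>
        if [c] == PySem.Chars.lower (PySem.List.pyGetD syms j "").toList
        then acc ++ [PySem.List.pyGetD syms j ""] else acc) acc
      = acc ++ syms.filter (pvMatch c) := by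
    intro acc c
    have h := PySem.List.foldl_pyRange_pyGetD syms "" (fun acc s =>
      if [c] == PySem.Chars.lower s.toList then acc ++ [s] else acc) acc (le_refl 0)
    simp only [Int.toNat_zero, List.drop_zero] at h
    rw [h]
    have h2 := PySem.List.foldl_append_if (fun s => [c] == PySem.Chars.lower s.toList)
      id syms acc
    simp only [id_eq, List.map_id] at h2
    rw [h2]
    congr 1
    apply List.filter_congr
    intro s _
    simp [pvMatch, PySem.Str.toList_lower]
  have hout := PySem.List.foldl_pyRange_pyGetD (PySem.Chars.lower word.toList) ' '
    (fun acc c =>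
      (PySem.List.pyRange 0 (PySem.List.len syms)).foldl (fun acc j =>
        if [c] == PySem.Chars.lower (PySem.List.pyGetD syms j "").toList
        then acc ++ [PySem.List.pyGetD syms j ""] else acc) acc)
    ([] : List String) (le_refl 0)
  simp only [Int.toNat_zero, List.drop_zero] at hout
  rw [hout]
  simp only [hinner]
  have h3 := PySem.List.foldl_append_eq_flatMap (fun c => syms.filter (pvMatch c))
    (PySem.Chars.lower word.toList) []
  simp only at h3
  rw [h3]
  simp [pvColl]

-- ---- A phase 2 ----
theorem pvInner_succ (n i : Nat) (l : List String) :
    pvInner n (i + 1) l =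
      (fun r => if r.getD n "" == r.getD i "" then r.set i "" else r) (pvInner n i l) := by
  simp [pvInner, List.range_succ]

theorem pvInner_length (n i : Nat) (l : List String) : (pvInner n i l).length = l.length := by
  induction i with
  | zero => simp [pvInner]
  | succ i ih => rw [pvInner_succ]; dsimp only; split <;> simp [ih]

theorem pvInner_getD (n : Nat) (l : List String) :
    ∀ i, i ≤ n → n < l.length → ∀ k, k < l.length →
    (pvInner n i l).getD k "" =
      if k < i ∧ l.getD k "" = l.getD n "" then "" else l.getD k "" := by
  intro i
  induction i with
  | zero => intro _ _ k _; simp [pvInner]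
  | succ i ih =>
    intro hin hn k hk
    have hin' : i ≤ n := by omega
    have hilt : i < l.length := by omega
    have hrlen : (pvInner n i l).length = l.length := pvInner_length n i l
    have hrn : (pvInner n i l).getD n "" = l.getD n "" := by
      rw [ih hin' hn n hn, if_neg (by rintro ⟨h, _⟩; omega)]
    have hri : (pvInner n i l).getD i "" = l.getD i "" := by
      rw [ih hin' hn i hilt, if_neg (by rintro ⟨h, _⟩; omega)]
    rw [pvInner_succ]; dsimp only
    by_cases hc : (pvInner n i l).getD n "" = (pvInner n i l).getD i ""
    · rw [if_pos (by simpa using hc)]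
      have hcc : l.getD n "" = l.getD i "" := by rw [← hrn, ← hri]; exact hc
      by_cases hke : i = k
      · subst hke
        rw [List.getD_eq_getElem?_getD, List.getElem?_set, if_pos rfl,
          if_pos (by omega), Option.getD_some]
        rw [if_pos ⟨by omega, hcc.symm⟩]
      · rw [List.getD_eq_getElem?_getD, List.getElem?_set, if_neg hke,
          ← List.getD_eq_getElem?_getD, ih hin' hn k hk]
        have hki : k ≠ i := fun h => hke h.symm
        by_cases hp : l.getD k "" = l.getD n ""
        · by_cases hlt : k < i
          · rw [if_pos ⟨hlt, hp⟩, if_pos ⟨by omega, hp⟩]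
          · rw [if_neg (fun h => hlt h.1), if_neg (fun h => hlt (by omega))]
        · rw [if_neg (fun h => hp h.2), if_neg (fun h => hp h.2)]
    · rw [if_neg (by simpa using hc)]
      have hcc : l.getD n "" ≠ l.getD i "" := by rw [← hrn, ← hri]; exact hc
      rw [ih hin' hn k hk]
      by_cases hp : l.getD k "" = l.getD n ""
      · by_cases hlt : k < i
        · rw [if_pos ⟨hlt, hp⟩, if_pos ⟨by omega, hp⟩]
        · by_cases hke : k = i
          · exact absurd (hke ▸ hp) (fun h => hcc h.symm)
          · rw [if_neg (fun h => hlt h.1), if_neg (fun h => hke (by omega))]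
      · rw [if_neg (fun h => hp h.2), if_neg (fun h => hp h.2)]

theorem pvOuter_succ (L : List String) (i : Nat) :
    pvOuter L (i + 1) = pvInner i i (pvOuter L i) := by
  simp [pvOuter, List.range_succ]

theorem pvOuter_length (L : List String) (i : Nat) : (pvOuter L i).length = L.length := by
  induction i with
  | zero => simp [pvOuter]
  | succ i ih => rw [pvOuter_succ, pvInner_length, ih]

theorem pvCond_self (L : List String) (i : Nat) : pvCond L i i = false := by
  simp only [pvCond, List.any_eq_false]
  intro m hm
  simp only [List.mem_range] at hm
  simp [Nat.not_lt.mpr (Nat.le_of_lt hm)]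

theorem pvCond_succ (L : List String) (k i : Nat) :
    pvCond L k (i + 1) = (pvCond L k i || (decide (k < i) && (L.getD i "" == L.getD k ""))) := by
  simp [pvCond, List.range_succ]

theorem pvOuter_getD (L : List String) (hne : "" ∉ L) :
    ∀ i, i ≤ L.length → ∀ k, k < L.length →
    (pvOuter L i).getD k "" = if pvCond L k i then "" else L.getD k "" := by
  intro i
  induction i with
  | zero => intro _ k _; simp [pvOuter, pvCond]
  | succ i ih =>
    intro hi k hk
    have hi' : i ≤ L.length := by omega
    have hil : i < L.length := by omega
    have hlen : (pvOuter L i).length = L.length := pvOuter_length L i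
    have hLi : L.getD i "" ≠ "" := by
      rw [List.getD_eq_getElem L "" hil]
      intro h; exact hne (h ▸ List.getElem_mem hil)
    rw [pvOuter_succ,
      pvInner_getD i (pvOuter L i) i (le_refl i) (by omega) k (by omega)]
    have hoi : (pvOuter L i).getD i "" = L.getD i "" := by
      rw [ih hi' i hil, pvCond_self]; simp
    have hok : (pvOuter L i).getD k "" = if pvCond L k i then "" else L.getD k "" :=
      ih hi' k hk
    rw [hoi, hok, pvCond_succ]
    by_cases c1 : pvCond L k i = true
    · simp only [c1, Bool.true_or, if_true]
      split <;> rfl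
    · have c1f : pvCond L k i = false := by simpa using c1
      simp only [c1f, Bool.false_or, Bool.false_eq_true, if_false]
      by_cases c2 : k < i ∧ L.getD k "" = L.getD i ""
      · rw [if_pos c2, if_pos (by
          simp only [Bool.and_eq_true, decide_eq_true_eq, beq_iff_eq]
          exact ⟨c2.1, c2.2.symm⟩)]
      · rw [if_neg c2, if_neg (by
          simp only [Bool.and_eq_true, decide_eq_true_eq, beq_iff_eq]
          rintro ⟨h1, h2⟩; exact c2 ⟨h1, h2.symm⟩)]

theorem pvBlank_length (L : List String) : (pvBlank L).length = L.length := by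
  induction L with
  | nil => rfl
  | cons x xs ih => simp [pvBlank, ih]

theorem pvBlank_getD (L : List String) :
    ∀ k, k < L.length →
    (pvBlank L).getD k "" = if L.getD k "" ∈ L.drop (k + 1) then "" else L.getD k "" := by
  induction L with
  | nil => intro k hk; simp at hk
  | cons x xs ih =>
    intro k hk
    cases k with
    | zero => simp [pvBlank]
    | succ k =>
      simp only [pvBlank, List.getD_cons_succ, List.drop_succ_cons]
      exact ih k (by simpa using hk)

theorem pvCond_iff_mem (L : List String) (k : Nat) (hk : k < L.length) :
    pvCond L k L.length = true ↔ L.getD k "" ∈ L.drop (k + 1) := by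
  constructor
  · intro h
    simp only [pvCond, List.any_eq_true, List.mem_range, Bool.and_eq_true,
      decide_eq_true_eq, beq_iff_eq] at h
    obtain ⟨m, hm, hkm, heq⟩ := h
    rw [List.mem_iff_getElem]
    have hj : m - (k + 1) < (L.drop (k + 1)).length := by
      simp only [List.length_drop]; omega
    refine ⟨m - (k + 1), hj, ?_⟩
    rw [List.getElem_drop, ← heq, List.getD_eq_getElem L "" hm]
    congr 1
    omega
  · intro h
    rw [List.mem_iff_getElem] at h
    obtain ⟨j, hj, hje⟩ := h
    have hjl : j < L.length - (k + 1) := by simpa [List.length_drop] using hj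
    simp only [pvCond, List.any_eq_true, List.mem_range, Bool.and_eq_true,
      decide_eq_true_eq, beq_iff_eq]
    refine ⟨k + 1 + j, by omega, by omega, ?_⟩
    rw [List.getD_eq_getElem L "" (by omega), ← List.getElem_drop (h := hj), hje]

theorem pvA_blank_eq (L : List String) (hne : "" ∉ L) : pvA_blank L = pvBlank L := by
  have h1 : pvA_blank L = pvOuter L L.length := by
    unfold pvA_blank pvOuter
    rw [show PySem.List.len L = ((L.length : Nat) : Int) from rfl,
      PySem.List.pyRange_zero_natCast, List.foldl_map]
    congr 1
    funext l i
    rw [PySem.List.pyRange_zero_natCast, List.foldl_map]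
    unfold pvInner
    congr 1
    funext l' j
    simp [PySem.List.pyGetD_natCast, List.getD_eq_getElem?_getD]
  rw [h1]
  apply List.ext_getElem
  · rw [pvOuter_length, pvBlank_length]
  · intro k hk1 hk2
    have hkL : k < L.length := by rwa [pvOuter_length] at hk1
    rw [← List.getD_eq_getElem _ "" hk1, ← List.getD_eq_getElem _ "" hk2,
      pvOuter_getD L hne L.length (le_refl _) k hkL, pvBlank_getD L k hkL]
    by_cases h : L.getD k "" ∈ L.drop (k + 1)
    · rw [if_pos h, if_pos ((pvCond_iff_mem L k hkL).mpr h)]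
    · rw [if_neg h, if_neg (by rw [pvCond_iff_mem L k hkL]; exact h)]

-- ---- blanking vs keep-last, at the character level ----
theorem pvCharsOf_append (a b : List String) : pvCharsOf (a ++ b) = pvCharsOf a ++ pvCharsOf b := by
  simp [pvCharsOf]

theorem pvCharsOf_blank (L : List String) :
    pvCharsOf (pvBlank L) = pvCharsOf (pvKeepLast L) := by
  induction L with
  | nil => rfl
  | cons x xs ih =>
    by_cases h : x ∈ xs
    · rw [show pvBlank (x :: xs) = "" :: pvBlank xs by simp [pvBlank, h],
        show pvKeepLast (x :: xs) = pvKeepLast xs by simp [pvKeepLast, h],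
        pvCharsOf_cons]
      simpa using ih
    · rw [show pvBlank (x :: xs) = x :: pvBlank xs by simp [pvBlank, h],
        show pvKeepLast (x :: xs) = x :: pvKeepLast xs by simp [pvKeepLast, h],
        pvCharsOf_cons, pvCharsOf_cons, ih]

-- ---- B phase 1 ----
theorem pvB_index_getD (syms : List String) :
    ∀ (d : PySem.Dict String (List String)) (k : String),
    (syms.foldl (fun d s =>
      if PySem.Str.len s == 1 then
        d.insert (PySem.Str.lower s) (d.getD (PySem.Str.lower s) [] ++ [s])
      else d) d).getD k []
    = d.getD k [] ++ syms.filter (fun s => (PySem.Str.len s == 1) && (PySem.Str.lower s == k)) := by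
  induction syms with
  | nil => intro d k; simp
  | cons s rest ih =>
    intro d k
    by_cases h1 : PySem.Str.len s = 1
    · simp only [List.foldl_cons, List.filter_cons, h1, beq_self_eq_true, if_pos, Bool.true_and]
      rw [ih]
      by_cases h2 : PySem.Str.lower s = k
      · rw [PySem.Dict.getD_insert, if_pos h2.symm]
        simp [h2]
      · rw [PySem.Dict.getD_insert, if_neg (fun h => h2 h.symm)]
        simp only [beq_iff_eq, h2, if_neg, List.append_assoc]
        simp [h2]
    · have : (PySem.Str.len s == 1) = false := by simpa using h1
      simp only [List.foldl_cons, List.filter_cons, this, Bool.false_and, if_neg Bool.false_ne_true]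
      exact ih d k

theorem pvB_collect_eq (syms : List String) (word : String) :
    pvB_collect syms word = pvColl syms (PySem.Chars.lower word.toList) := by
  unfold pvB_collect
  have hkey : ∀ c : Char, (pvB_index syms).getD (String.ofList [c]) [] = syms.filter (pvMatch c) := by
    intro c
    unfold pvB_index
    rw [pvB_index_getD]
    have hempty : (⟨[]⟩ : PySem.Dict String (List String)).getD (String.ofList [c]) [] = [] := by
      simp [PySem.Dict.getD, PySem.Dict.get?]
    rw [hempty, List.nil_append]
    apply List.filter_congr
    intro s _
    simp only [pvMatch, PySem.Str.len_eq]
    by_cases h : (PySem.Str.lower s).toList = [c]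
    · have hl : s.toList.length = 1 := by
        have := congrArg List.length h
        simpa [PySem.Str.toList_lower, PySem.Chars.lower] using this
      have hs : PySem.Str.lower s = String.ofList [c] := by
        apply String.toList_inj.mp; rw [h]; simp
      have e1 : (PySem.Str.lower s == String.ofList [c]) = true := by simpa using hs
      have e2 : (([c] : List Char) == (PySem.Str.lower s).toList) = true := by
        simpa using h.symm
      rw [hl, e1, e2, Bool.and_true]
      decide
    · have h2 : PySem.Str.lower s ≠ String.ofList [c] := by
        intro he; apply h; rw [he]; simp
      have h3 : ¬ ([c] = (PySem.Str.lower s).toList) := fun he => h he.symm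
      have e1 : (PySem.Str.lower s == String.ofList [c]) = false := by simpa using h2
      have e2 : (([c] : List Char) == (PySem.Str.lower s).toList) = false := by
        simpa using h3
      rw [e1, e2, Bool.and_false]
  simp only [PySem.Str.toList_lower, hkey]
  rw [PySem.List.foldl_append_eq_flatMap (fun c => syms.filter (pvMatch c))]
  simp [pvColl]

-- ---- B dedup ----
theorem pvB_fold_dedup (M : List String) :
    ∀ (seen kept : List String),
    (M.foldl (fun (p : PySem.Set String × List String) s =>
      if p.1.contains s then p else (p.1.add s, p.2 ++ [s])) (seen, kept)).2
    = kept ++ pvDedup seen M := by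
  induction M with
  | nil => intro seen kept; simp [pvDedup]
  | cons x xs ih =>
    intro seen kept
    rw [List.foldl_cons]
    by_cases hm : x ∈ seen
    · have h' : PySem.Set.contains seen x = true := by
        show List.contains seen x = true; simpa using hm
      rw [if_pos h']
      rw [ih seen kept, show pvDedup seen (x :: xs) = pvDedup seen xs by
        simp [pvDedup, hm]]
    · have h' : ¬ PySem.Set.contains seen x = true := by
        show ¬ List.contains seen x = true; simpa using hm
      rw [if_neg h']
      have hadd : PySem.Set.add seen x = seen ++ [x] := by
        simp only [PySem.Set.add, PySem.Set.contains]
        simp [hm]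
      rw [show ((PySem.Set.add seen x, kept ++ [x]) : PySem.Set String × List String)
          = ((seen ++ [x] : List String), kept ++ [x]) by rw [hadd]]
      rw [ih (seen ++ [x]) (kept ++ [x]),
        show pvDedup seen (x :: xs) = x :: pvDedup (seen ++ [x]) xs by
          simp [pvDedup, hm]]
      simp

theorem pvDedup_append (x : String) :
    ∀ (M seen : List String),
    pvDedup seen (M ++ [x]) =
      pvDedup seen M ++ (if x ∈ seen ∨ x ∈ M then [] else [x]) := by
  intro M
  induction M with
  | nil => intro seen; by_cases h : x ∈ seen <;> simp [pvDedup, h]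
  | cons y ys ih =>
    intro seen
    by_cases h : y ∈ seen
    · rw [List.cons_append,
        show pvDedup seen (y :: (ys ++ [x])) = pvDedup seen (ys ++ [x]) by
          simp [pvDedup, h],
        show pvDedup seen (y :: ys) = pvDedup seen ys by simp [pvDedup, h], ih]
      congr 1
      by_cases hxy : x = y
      · subst hxy; simp [h]
      · simp [List.mem_cons, hxy]
    · rw [List.cons_append,
        show pvDedup seen (y :: (ys ++ [x])) = y :: pvDedup (seen ++ [y]) (ys ++ [x]) by
          simp [pvDedup, h],
        show pvDedup seen (y :: ys) = y :: pvDedup (seen ++ [y]) ys by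
          simp [pvDedup, h],
        ih (seen ++ [y]), List.cons_append]
      congr 2
      simp only [List.mem_append, List.mem_cons, List.mem_singleton]
      by_cases hxy : x = y <;> simp [hxy] <;> tauto

theorem pvDedup_rev (L : List String) : (pvDedup [] L.reverse).reverse = pvKeepLast L := by
  induction L with
  | nil => rfl
  | cons x xs ih =>
    rw [List.reverse_cons, pvDedup_append, List.reverse_append]
    by_cases h : x ∈ xs
    · rw [show pvKeepLast (x :: xs) = pvKeepLast xs by simp [pvKeepLast, h]]
      rw [if_pos (by simp [h]), ← ih]
      simp
    · rw [show pvKeepLast (x :: xs) = x :: pvKeepLast xs by simp [pvKeepLast, h]]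
      rw [if_neg (by simp [h]), ← ih]
      simp

theorem pvB_dedup_eq (collected : List String) : pvB_dedup collected = pvKeepLast collected := by
  unfold pvB_dedup
  rw [show (PySem.Set.ofList [] : PySem.Set String) = ([] : List String) from rfl]
  rw [pvB_fold_dedup, List.nil_append, pvDedup_rev]

-- ---- one-char lists and trimming ----
theorem pvKeepLast_subset (L : List String) : ∀ x ∈ pvKeepLast L, x ∈ L := by
  induction L with
  | nil => simp [pvKeepLast]
  | cons y ys ih =>
    intro x hx
    by_cases h : y ∈ ys
    · rw [pvKeepLast, if_pos h] at hx; exact List.mem_cons_of_mem y (ih x hx)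
    · rw [pvKeepLast, if_neg h] at hx
      rcases List.mem_cons.mp hx with h1 | h1
      · exact h1 ▸ List.mem_cons_self
      · exact List.mem_cons_of_mem y (ih x h1)

theorem pvOne_coll (syms : List String) (w : List Char) : pvOne (pvColl syms w) := by
  intro s hs
  simp only [pvColl, List.mem_flatMap, List.mem_filter] at hs
  obtain ⟨c, _, _, hm⟩ := hs
  have h1 : ([c] : List Char) = (PySem.Str.lower s).toList := by
    simpa [pvMatch] using hm
  have := congrArg List.length h1.symm
  simpa [PySem.Str.toList_lower, PySem.Chars.lower] using this

theorem pvStrIsspace_one (s : String) (c : Char) (h : s.toList = [c]) :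
    PySem.Str.strIsspace s = PySem.Chars.isspace c := by
  rw [PySem.Str.strIsspace_eq, h]
  simp [PySem.Chars.strIsspace]

theorem pvLstrip_chars (K : List String) (h : pvOne K) :
    PySem.Chars.lstrip (pvCharsOf K) =
      pvCharsOf (K.dropWhile (fun s => PySem.Str.strIsspace s)) := by
  induction K with
  | nil => rfl
  | cons s ks ih =>
    obtain ⟨c, hc⟩ := List.length_eq_one_iff.mp (h s List.mem_cons_self)
    have hks : pvOne ks := fun t ht => h t (List.mem_cons_of_mem s ht)
    simp only [pvCharsOf, List.map_cons, List.flatten_cons, hc, List.singleton_append]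
    rw [List.dropWhile_cons]
    by_cases hsp : PySem.Chars.isspace c = true
    · rw [show PySem.Chars.lstrip (c :: ((ks.map String.toList).flatten)) =
          PySem.Chars.lstrip ((ks.map String.toList).flatten) by
            simp [PySem.Chars.lstrip, List.dropWhile_cons, hsp]]
      rw [if_pos (by rw [pvStrIsspace_one s c hc]; exact hsp)]
      exact ih hks
    · rw [show PySem.Chars.lstrip (c :: ((ks.map String.toList).flatten)) =
          c :: ((ks.map String.toList).flatten) by
            simp [PySem.Chars.lstrip, List.dropWhile_cons, hsp]]
      rw [if_neg (by rw [pvStrIsspace_one s c hc]; simpa using hsp)]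
      simp [pvCharsOf, hc]

theorem pvCharsOf_reverse (K : List String) (h : pvOne K) :
    (pvCharsOf K).reverse = pvCharsOf K.reverse := by
  induction K with
  | nil => rfl
  | cons s ks ih =>
    obtain ⟨c, hc⟩ := List.length_eq_one_iff.mp (h s List.mem_cons_self)
    have hks : pvOne ks := fun t ht => h t (List.mem_cons_of_mem s ht)
    rw [List.reverse_cons, pvCharsOf_append]
    simp only [pvCharsOf, List.map_cons, List.flatten_cons, hc, List.singleton_append,
      List.reverse_cons]
    rw [show ((ks.map String.toList).flatten).reverse ++ [c]
        = ((ks.map String.toList).flatten).reverse ++ [c] from rfl]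
    have := ih hks
    simp only [pvCharsOf] at this
    rw [this]
    simp [hc]

theorem pvMapBack (K : List String) (h : pvOne K) :
    (pvCharsOf K).map (fun c => String.ofList [c]) = K := by
  induction K with
  | nil => rfl
  | cons s ks ih =>
    obtain ⟨c, hc⟩ := List.length_eq_one_iff.mp (h s List.mem_cons_self)
    have hks : pvOne ks := fun t ht => h t (List.mem_cons_of_mem s ht)
    rw [pvCharsOf_cons, List.map_append, ih hks, hc]
    simp only [List.map_cons, List.map_nil]
    rw [show String.ofList [c] = s by rw [← hc, String.ofList_toList]]
    simp

theorem pvJoinNil : ∀ (ps : List (List Char)), PySem.Chars.join [] ps = ps.flatten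
  | [] => rfl
  | [a] => by simp [PySem.Chars.join, List.intercalate]
  | a :: b :: ps => by
    have ih := pvJoinNil (b :: ps)
    simp only [PySem.Chars.join, List.intercalate] at ih ⊢
    rw [List.intersperse_cons₂, List.flatten_cons, List.flatten_cons, ih,
      List.flatten_cons, List.nil_append]
    simp

theorem pvMapRange (t : String) :
    (PySem.List.pyRange 0 (PySem.Str.len t)).map
      (fun i => String.ofList [PySem.List.pyGetD t.toList i ' '])
    = t.toList.map (fun c => String.ofList [c]) := by
  rw [show PySem.Str.len t = PySem.List.len t.toList from by
    simp [PySem.Str.len_eq, PySem.List.len]]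
  conv_rhs => rw [← PySem.List.map_pyGetD_pyRange_zero t.toList ' ']
  rw [List.map_map]
  rfl

-- ===== VERDICT (by name: the statement is the Claim_ definition above) =====
theorem try_symbols_spec : Claim_equal_try_symbols := by
  intro syms word _
  show try_symbols syms word = try_symbols_alt syms word
  simp only [try_symbols, try_symbols_alt]
  rw [pvA_collect_eq, pvB_collect_eq, pvB_dedup_eq]
  set L := pvColl syms (PySem.Chars.lower word.toList) with hLdef
  have hL : pvOne L := pvOne_coll syms (PySem.Chars.lower word.toList)
  have hne : ("" : String) ∉ L := fun hmem => by have := hL "" hmem; simp at this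
  rw [pvA_blank_eq _ hne]
  have hone1 : pvOne (pvKeepLast L) := fun s hs => hL s (pvKeepLast_subset L s hs)
  set K1 := pvKeepLast L with hK1
  set K2 := K1.dropWhile (fun s => PySem.Str.strIsspace s) with hK2
  have hone2 : pvOne K2 := fun s hs => hone1 s ((List.dropWhile_sublist _).mem hs)
  have hone2r : pvOne K2.reverse := fun s hs => hone2 s (List.mem_reverse.mp hs)
  set K3 := (K2.reverse.dropWhile (fun s => PySem.Str.strIsspace s)).reverse with hK3
  have hone3 : pvOne K3 := fun s hs =>
    hone2r s ((List.dropWhile_sublist _).mem (List.mem_reverse.mp hs))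
  rw [pvMapRange]
  have hstr : (PySem.Str.strip (PySem.Str.join "" (pvBlank L))).toList = pvCharsOf K3 := by
    rw [PySem.Str.toList_strip, PySem.Str.toList_join,
      show ("" : String).toList = [] from rfl, pvJoinNil,
      show ((pvBlank L).map String.toList).flatten = pvCharsOf (pvBlank L) from rfl,
      pvCharsOf_blank, ← hK1,
      show PySem.Chars.strip (pvCharsOf K1)
        = PySem.Chars.rstrip (PySem.Chars.lstrip (pvCharsOf K1)) from rfl,
      pvLstrip_chars K1 hone1, ← hK2,
      show PySem.Chars.rstrip (pvCharsOf K2)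
        = (List.dropWhile PySem.Chars.isspace (pvCharsOf K2).reverse).reverse from rfl,
      pvCharsOf_reverse K2 hone2,
      show List.dropWhile PySem.Chars.isspace (pvCharsOf K2.reverse)
        = PySem.Chars.lstrip (pvCharsOf K2.reverse) from rfl,
      pvLstrip_chars K2.reverse hone2r,
      pvCharsOf_reverse _ (fun s hs => hone2r s ((List.dropWhile_sublist _).mem hs)),
      ← hK3]
  rw [hstr, pvMapBack K3 hone3]
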